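-- pv_equiv track=rewrite | github.com/DepFCD/DepFCD | Scripts/setup/merge_conf_ast.py | origin_file_lines_impl
-- ===== SOURCE A (Python) =====
-- def origin_file_lines_impl(lines, merge_lines):
--     idx = 0
--     jdx = 0
--     start = 0
--     end = 0
--     merge_len = len(merge_lines)
--     while idx < merge_len:
--         if merge_lines[idx] == lines[jdx]:
--             start = idx + 1
--             inner_idx = idx
--             inner_jdx = jdx
--             while inner_idx < merge_len and inner_jdx < len(lines):
--                 if merge_lines[inner_idx] == lines[inner_jdx]:
--                     inner_idx += 1
--                     inner_jdx += 1
--                 else: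
--                     break
--             if inner_jdx < len(lines):
--                 start = 0
--                 idx += 1
--                 jdx = 0
--             else:
--                 end = inner_idx
--         else:
--             idx += 1
--         if start != 0:
--             break
--     return start, end, len(lines)
-- ===== SOURCE B (Python) =====
-- def origin_file_lines_impl(lines, merge_lines):
--     n = len(lines)
--     head, rest = lines[0], lines[1:]
--     for i, x in enumerate(merge_lines):
--         if x == head and merge_lines[i + 1:i + n] == rest:
--             return i + 1, i + n, n
--     return 0, 0, n
-- ===== Notes on version B (the rewrite author's own statement) =====
-- stated objective: alternative
-- what changed: A runs a hand-rolled nested index-juggling search with start/end/jdx state and restart bookkeeping; B is a single enumerate pass that, on a head match, compares the remaining window to the pattern tail by one slice comparison.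
-- outside the precondition, e.g. on origin_file_lines_impl([], []): A returns (0, 0, 0), B raises IndexError
import Mathlib
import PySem

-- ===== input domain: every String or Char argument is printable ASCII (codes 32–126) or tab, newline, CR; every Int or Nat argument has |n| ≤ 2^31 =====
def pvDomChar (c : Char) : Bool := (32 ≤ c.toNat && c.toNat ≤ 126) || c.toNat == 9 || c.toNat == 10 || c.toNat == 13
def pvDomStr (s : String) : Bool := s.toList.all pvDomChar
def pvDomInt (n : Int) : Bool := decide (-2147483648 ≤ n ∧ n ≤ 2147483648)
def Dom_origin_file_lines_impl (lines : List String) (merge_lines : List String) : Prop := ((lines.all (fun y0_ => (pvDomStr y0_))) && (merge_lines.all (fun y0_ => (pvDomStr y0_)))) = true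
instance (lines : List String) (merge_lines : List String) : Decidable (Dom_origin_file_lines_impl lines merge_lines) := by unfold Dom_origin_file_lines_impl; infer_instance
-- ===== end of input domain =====

-- B replaces A's nested index-juggling search (start/end/jdx state, restart bookkeeping) by one
-- enumerate pass with a single slice comparison per head match; alternative structure, same worst-case cost.

-- ===== PORT A =====
-- inner while loop: advances (inner_idx, inner_jdx) while both in range and elements equal
def aInner (merge : List String) (lines : List String) (ii : Nat) (ij : Nat) : Nat × Nat :=
  if _h : ii < merge.length ∧ ij < lines.length then
    if merge.getD ii "" = lines.getD ij "" then aInner merge lines (ii + 1) (ij + 1)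
    else (ii, ij)
  else (ii, ij)
termination_by merge.length - ii

-- outer while loop; start/end are only returned at the break point, so they appear as return values
def aOuter (merge : List String) (lines : List String) (idx : Nat) (jdx : Nat) : Int × Int × Int :=
  if _h : idx < merge.length then
    match PySem.List.pyGet? lines ((jdx : Nat) : Int) with
    | none => (0, 0, (lines.length : Int))   -- Python raises IndexError here (outside Pre_)
    | some lj =>
      if merge.getD idx "" = lj then
        let p := aInner merge lines idx jdx
        if p.2 < lines.length then aOuter merge lines (idx + 1) 0
        else ((idx : Int) + 1, (p.1 : Int), (lines.length : Int))
      else aOuter merge lines (idx + 1) jdx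
  else (0, 0, (lines.length : Int))
termination_by merge.length - idx

def origin_file_lines_impl (lines : List String) (merge_lines : List String) : Int × Int × Int :=
  aOuter merge_lines lines 0 0

-- ===== PORT B =====
-- one pass over merge_lines with its index; slice comparison at each head match
def bGo (merge : List String) (head : String) (rest : List String) (n : Nat) (i : Nat) (tl : List String) : Int × Int × Int :=
  match tl with
  | [] => (0, 0, (n : Int))
  | x :: tl' =>
    if x = head ∧ PySem.List.slice merge (some ((i : Int) + 1)) (some ((i : Int) + (n : Int))) = rest
    then ((i : Int) + 1, (i : Int) + (n : Int), (n : Int))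
    else bGo merge head rest n (i + 1) tl'

def origin_file_lines_impl_alt (lines : List String) (merge_lines : List String) : Int × Int × Int :=
  match lines with
  | [] => (0, 0, 0)   -- Python raises IndexError on lines[0] (outside Pre_)
  | head :: rest => bGo merge_lines head rest lines.length 0 merge_lines

-- ===== PRECONDITION & SPEC =====
-- Pre_ excludes empty `lines`: there A raises IndexError whenever merge_lines is non-empty (and B
-- raises too); on ([], []) A's (0,0,0) is an accident of the loop body never running.
def Pre_origin_file_lines_impl (lines : List String) (merge_lines : List String) : Prop := lines ≠ []
instance (lines : List String) (merge_lines : List String) : Decidable (Pre_origin_file_lines_impl lines merge_lines) := by unfold Pre_origin_file_lines_impl; infer_instance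

def pvWitness_origin_file_lines_impl : List String × List String := (["a"], ["b", "a"])

def Spec_origin_file_lines_impl (lines : List String) (merge_lines : List String) (out : Int × Int × Int) : Prop := out = origin_file_lines_impl_alt lines merge_lines
instance (lines : List String) (merge_lines : List String) (out : Int × Int × Int) : Decidable (Spec_origin_file_lines_impl lines merge_lines out) := by unfold Spec_origin_file_lines_impl; infer_instance

-- ===== CLAIM (what is proved, stated in full; the proofs are below) =====
def Claim_equal_origin_file_lines_impl : Prop := ∀ (lines : List String) (merge_lines : List String), Dom_origin_file_lines_impl lines merge_lines → Pre_origin_file_lines_impl lines merge_lines → Spec_origin_file_lines_impl lines merge_lines (origin_file_lines_impl lines merge_lines)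

-- ===== LEMMAS AND PROOFS =====

-- the inner loop consumes all of `lines.drop ij` when it is a prefix of `merge.drop ii`
theorem aInner_full (merge lines : List String) (ii ij : Nat) (hij : ij ≤ lines.length)
    (h : lines.drop ij <+: merge.drop ii) :
    aInner merge lines ii ij = (ii + (lines.length - ij), lines.length) := by
  rw [aInner]
  by_cases hij2 : ij < lines.length
  · have hii : ii < merge.length := by
      have hl := h.length_le
      simp [List.length_drop] at hl
      omega
    have hld : lines.drop ij = lines[ij] :: lines.drop (ij + 1) := List.drop_eq_getElem_cons hij2
    have hmd : merge.drop ii = merge[ii] :: merge.drop (ii + 1) := List.drop_eq_getElem_cons hii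
    rw [hld, hmd, List.cons_prefix_cons] at h
    have hgd : merge.getD ii "" = lines.getD ij "" := by
      rw [List.getD_eq_getElem _ _ hii, List.getD_eq_getElem _ _ hij2, h.1]
    rw [dif_pos ⟨hii, hij2⟩, if_pos hgd]
    rw [aInner_full merge lines (ii + 1) (ij + 1) (by omega) h.2]
    simp [Prod.ext_iff]
    omega
  · rw [dif_neg (by omega)]
    simp [Prod.ext_iff]
    omega
termination_by lines.length - ij

-- otherwise it stops with inner_jdx short of lines.length
theorem aInner_partial (merge lines : List String) (ii ij : Nat)
    (h : ¬ lines.drop ij <+: merge.drop ii) :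
    (aInner merge lines ii ij).2 < lines.length := by
  have hij2 : ij < lines.length := by
    by_contra hc
    exact h (by simp [List.drop_eq_nil_iff.mpr (by omega : lines.length ≤ ij)])
  rw [aInner]
  by_cases hii : ii < merge.length
  · rw [dif_pos ⟨hii, hij2⟩]
    have hld : lines.drop ij = lines[ij] :: lines.drop (ij + 1) := List.drop_eq_getElem_cons hij2
    have hmd : merge.drop ii = merge[ii] :: merge.drop (ii + 1) := List.drop_eq_getElem_cons hii
    by_cases hgd : merge.getD ii "" = lines.getD ij ""
    · rw [if_pos hgd]
      refine aInner_partial merge lines (ii + 1) (ij + 1) ?_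
      intro hp
      apply h
      rw [hld, hmd, List.cons_prefix_cons]
      rw [List.getD_eq_getElem _ _ hii, List.getD_eq_getElem _ _ hij2] at hgd
      exact ⟨hgd.symm, hp⟩
    · rw [if_neg hgd]
      exact hij2
  · rw [dif_neg (by omega)]
    exact hij2
termination_by lines.length - ij

-- the slice merge_lines[i+1:i+n] (n = rest.length+1) is a take of the tail after position i
theorem slice_window (merge tl' : List String) (idx k : Nat) (htl : merge.drop (idx + 1) = tl') :
    PySem.List.slice merge (some ((idx : Int) + 1)) (some ((idx : Int) + ((k + 1 : Nat) : Int)))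
      = tl'.take k := by
  have h1 : ((idx : Int) + 1) = ((idx + 1 : Nat) : Int) := by push_cast; ring
  have h2 : ((idx : Int) + ((k + 1 : Nat) : Int)) = ((idx + 1 : Nat) : Int) + ((k : Nat) : Int) := by
    push_cast; ring
  rw [h1, h2, PySem.List.slice_natCast_add, htl]

-- main correspondence between A's outer loop from idx and B's scan over merge.drop idx
theorem main_loop (merge : List String) (head : String) (rest : List String) :
    ∀ (t : List String) (idx : Nat), merge.drop idx = t →
      aOuter merge (head :: rest) idx 0 = bGo merge head rest (rest.length + 1) idx t := by
  intro t
  induction t with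
  | nil =>
    intro idx h
    have hge : merge.length ≤ idx := by
      by_contra hc
      exact absurd h (by simp [List.drop_eq_nil_iff]; omega)
    rw [aOuter, dif_neg (by omega)]
    simp [bGo]
  | cons x tl' ih =>
    intro idx h
    have hidx : idx < merge.length := by
      by_contra hc
      rw [List.drop_eq_nil_iff.mpr (by omega)] at h
      simp at h
    have hx : merge[idx]? = some x := by
      have h0 := congrArg (fun l => l[0]?) h
      simpa [List.getElem?_drop] using h0
    have htl : merge.drop (idx + 1) = tl' := by
      have hdd : merge.drop (idx + 1) = (merge.drop idx).drop 1 := by rw [List.drop_drop]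
      rw [hdd, h]
      rfl
    have hgd : merge.getD idx "" = x := by rw [List.getD_eq_getElem?_getD, hx]; rfl
    have hwin := slice_window merge tl' idx rest.length htl
    rw [aOuter, dif_pos hidx]
    have hpy : PySem.List.pyGet? (head :: rest) (((0 : Nat) : Int)) = some head := by
      simp
    rw [hpy]
    dsimp only
    by_cases hxh : x = head
    · by_cases hp : rest <+: tl'
      · -- full match at idx
        have hpre : (head :: rest).drop 0 <+: merge.drop idx := by
          rw [List.drop_zero, h, hxh]
          exact List.cons_prefix_cons.mpr ⟨rfl, hp⟩
        rw [if_pos (show merge.getD idx "" = head by rw [hgd, hxh])]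
        rw [aInner_full merge (head :: rest) idx 0 (by omega) hpre]
        simp only [List.length_cons, Nat.sub_zero]
        rw [if_neg (by omega)]
        have hs : PySem.List.slice merge (some ((idx : Int) + 1))
            (some ((idx : Int) + ((rest.length + 1 : Nat) : Int))) = rest := by
          rw [hwin]
          exact (List.prefix_iff_eq_take.mp hp).symm
        rw [bGo, if_pos ⟨hxh, hs⟩]
        simp only [Prod.mk.injEq]
        push_cast
        simp
      · -- head matches, tail does not: both advance
        have hnpre : ¬ (head :: rest).drop 0 <+: merge.drop idx := by
          rw [List.drop_zero, h, hxh]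
          intro hc
          exact hp (List.cons_prefix_cons.mp hc).2
        rw [if_pos (show merge.getD idx "" = head by rw [hgd, hxh])]
        rw [if_pos (aInner_partial merge (head :: rest) idx 0 hnpre)]
        rw [bGo, if_neg ?_, ih (idx + 1) htl]
        rintro ⟨-, hs⟩
        apply hp
        rw [hwin] at hs
        rw [← hs]
        exact List.take_prefix _ _
    · -- head mismatch: both advance
      rw [if_neg (show ¬ merge.getD idx "" = head by rw [hgd]; exact hxh)]
      rw [bGo, if_neg (by rintro ⟨hc, -⟩; exact hxh hc), ih (idx + 1) htl]

theorem origin_file_lines_impl_spec : Claim_equal_origin_file_lines_impl := by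
  intro lines merge_lines _hdom hpre
  unfold Spec_origin_file_lines_impl origin_file_lines_impl origin_file_lines_impl_alt
  match lines with
  | [] => exact absurd rfl hpre
  | head :: rest =>
    simpa using main_loop merge_lines head rest merge_lines 0 (by simp)
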